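-- pv_equiv track=rewrite | github.com/limwa/FEUP-FPRO | test/re04/fizz.py | adigits
-- ===== SOURCE A (Python) =====
-- def adigits(n1, n2, n3):
--     digits = [n1, n2, n3]
--     digits.sort(reverse=True)
--
--     result = 0
--     for i in digits:
--         result *= 10
--         result += i
--
--     return result
-- ===== SOURCE B (Python) =====
-- def adigits(n1, n2, n3):
--     hi = max(n1, n2, n3)
--     lo = min(n1, n2, n3)
--     mid = n1 + n2 + n3 - hi - lo
--     return 100 * hi + 10 * mid + lo
-- ===== Notes on version B (the rewrite author's own statement) =====
-- stated objective: simpler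
-- what changed: Replaces the list/sort/accumulation loop with a closed-form expression 100*max + 10*(sum - max - min) + min.
import Mathlib
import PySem

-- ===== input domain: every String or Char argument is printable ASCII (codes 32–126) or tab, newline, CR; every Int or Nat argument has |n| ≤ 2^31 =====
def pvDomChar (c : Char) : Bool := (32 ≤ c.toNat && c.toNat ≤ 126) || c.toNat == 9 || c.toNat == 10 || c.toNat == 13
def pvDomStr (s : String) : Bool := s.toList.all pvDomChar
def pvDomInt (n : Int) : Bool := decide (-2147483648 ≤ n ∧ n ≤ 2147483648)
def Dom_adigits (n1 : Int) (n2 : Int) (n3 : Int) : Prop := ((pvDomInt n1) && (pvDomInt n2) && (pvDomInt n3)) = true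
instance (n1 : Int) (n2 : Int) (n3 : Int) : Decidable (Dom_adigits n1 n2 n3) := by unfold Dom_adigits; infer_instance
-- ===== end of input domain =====

-- B replaces A's sort-then-accumulate loop with the closed form 100*max + 10*mid + min (objective: simpler).

-- ===== PORT A =====
def adigits (n1 : Int) (n2 : Int) (n3 : Int) : Int :=
  let digits := PySem.List.sorted [n1, n2, n3] (fun x => x) true
  digits.foldl (fun result i => result * 10 + i) 0

-- ===== PORT B =====
def adigits_alt (n1 : Int) (n2 : Int) (n3 : Int) : Int :=
  let hi := max n1 (max n2 n3)
  let lo := min n1 (min n2 n3)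
  let mid := n1 + n2 + n3 - hi - lo
  100 * hi + 10 * mid + lo

-- ===== PRECONDITION & SPEC =====
def Spec_adigits (n1 : Int) (n2 : Int) (n3 : Int) (out : Int) : Prop := out = adigits_alt n1 n2 n3
instance (n1 : Int) (n2 : Int) (n3 : Int) (out : Int) : Decidable (Spec_adigits n1 n2 n3 out) := by unfold Spec_adigits; infer_instance

-- ===== CLAIM (what is proved, stated in full; the proofs are below) =====
def Claim_equal_adigits : Prop := ∀ (n1 : Int) (n2 : Int) (n3 : Int), Dom_adigits n1 n2 n3 → Spec_adigits n1 n2 n3 (adigits n1 n2 n3)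

-- ===== LEMMAS AND PROOFS =====

-- ===== VERDICT (by name: the statement is the Claim_ definition above) =====
theorem adigits_spec : Claim_equal_adigits := by
  intro n1 n2 n3 _
  unfold Spec_adigits adigits adigits_alt
  simp only [PySem.List.sorted, List.foldl, PySem.List.insertBy]
  split_ifs <;>
    simp only [PySem.List.insertBy, decide_eq_true_eq] <;>
    split_ifs <;>
    simp_all only [List.foldl, max_def, min_def, decide_eq_true_eq] <;>
    split_ifs <;>
    omega
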